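-- pv_equiv track=rewrite | github.com/rishugoyal805/DRID-Project-Word-Puzzle-Game | word_puzzle.py | get_cells_in_line
-- ===== SOURCE A (Python) =====
-- def get_cells_in_line(start, end):
--     """Returns a list of cells between start and end if they form a valid line."""
--     start_row, start_col = start
--     end_row, end_col = end
--
--     cells_in_line = []
--    # Check if the cells are in a straight line (horizontal, vertical, diagonal)
--     if start_row == end_row:  # Horizontal
--         step = 1 if start_col < end_col else -1
--         for col in range(start_col, end_col + step, step):
--             cells_in_line.append((start_row, col))
--     elif start_col == end_col:  # Vertical
--         step = 1 if start_row < end_row else -1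
--         for row in range(start_row, end_row + step, step):
--             cells_in_line.append((row, start_col))
--     elif abs(start_row - end_row) == abs(start_col - end_col):  # Diagonal
--         row_step = 1 if start_row < end_row else -1
--         col_step = 1 if start_col < end_col else -1
--         for i in range(abs(start_row - end_row) + 1):
--             cells_in_line.append((start_row + i * row_step, start_col + i * col_step))
--
--     return cells_in_line
-- ===== SOURCE B (Python) =====
-- def get_cells_in_line(start, end):
--     """Returns a list of cells between start and end if they form a valid line."""
--     start_row, start_col = start
--     end_row, end_col = end
--     dr = end_row - start_row
--     dc = end_col - start_col
--     if not (dr == 0 or dc == 0 or abs(dr) == abs(dc)):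
--         return []
--     # Walk backwards from end to start, moving each differing coordinate one
--     # cell closer per step; collect cells back-to-front and reverse at the end.
--     r, c = end_row, end_col
--     cells = []
--     while (r, c) != (start_row, start_col):
--         cells.append((r, c))
--         if r > start_row:
--             r -= 1
--         elif r < start_row:
--             r += 1
--         if c > start_col:
--             c -= 1
--         elif c < start_col:
--             c += 1
--     cells.append((start_row, start_col))
--     cells.reverse()
--     return cells
-- ===== Notes on version B (the rewrite author's own statement) =====
-- stated objective: alternative
-- what changed: Replaces A's three forward range-loops (horizontal/vertical/diagonal branches with per-branch step logic) by a validity guard plus a single backward walk from end to start that moves each differing coordinate one cell closer, accumulating back-to-front and reversing once.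
import Mathlib
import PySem

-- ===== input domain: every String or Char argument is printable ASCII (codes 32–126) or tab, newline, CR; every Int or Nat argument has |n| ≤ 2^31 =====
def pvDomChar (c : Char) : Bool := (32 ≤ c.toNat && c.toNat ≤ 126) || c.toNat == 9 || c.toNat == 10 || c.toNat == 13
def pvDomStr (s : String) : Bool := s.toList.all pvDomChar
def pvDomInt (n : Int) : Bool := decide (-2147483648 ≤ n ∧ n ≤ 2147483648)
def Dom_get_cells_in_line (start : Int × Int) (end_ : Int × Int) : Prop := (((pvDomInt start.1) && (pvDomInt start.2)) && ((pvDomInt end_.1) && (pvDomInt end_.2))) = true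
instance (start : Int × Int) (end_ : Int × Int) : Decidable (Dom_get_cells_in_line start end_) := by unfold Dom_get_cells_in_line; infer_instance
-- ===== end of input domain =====

-- ===== PORT A =====
-- B replaces A's three forward range-loops by a guard plus one backward walk
-- from end to start, accumulated back-to-front and reversed (objective: alternative).
def get_cells_in_line (start : Int × Int) (end_ : Int × Int) : List (Int × Int) :=
  let start_row := start.1
  let start_col := start.2
  let end_row := end_.1
  let end_col := end_.2
  let cells_in_line : List (Int × Int) := []
  if start_row = end_row then  -- Horizontal
    let step : Int := if start_col < end_col then 1 else -1
    (PySem.List.pyRange start_col (end_col + step) step).foldl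
      (fun acc col => acc ++ [(start_row, col)]) cells_in_line
  else if start_col = end_col then  -- Vertical
    let step : Int := if start_row < end_row then 1 else -1
    (PySem.List.pyRange start_row (end_row + step) step).foldl
      (fun acc row => acc ++ [(row, start_col)]) cells_in_line
  else if |start_row - end_row| = |start_col - end_col| then  -- Diagonal
    let row_step : Int := if start_row < end_row then 1 else -1
    let col_step : Int := if start_col < end_col then 1 else -1
    (PySem.List.pyRange 0 (|start_row - end_row| + 1) 1).foldl
      (fun acc i => acc ++ [(start_row + i * row_step, start_col + i * col_step)]) cells_in_line
  else cells_in_line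

-- ===== PORT B =====
-- the while loop of Source B: walk (r, c) one cell toward (sr, sc) per iteration,
-- appending the visited cell; stops when (r, c) = (sr, sc)
-- fuel is only a totality device: |r-sr| + |c-sc| strictly decreases each
-- iteration, so the initial distance is always enough fuel
def pvWalkBack (fuel : Nat) (sr sc r c : Int) (cells : List (Int × Int)) : List (Int × Int) :=
  match fuel with
  | 0 => cells
  | fuel + 1 =>
    if r = sr ∧ c = sc then cells
    else
      let cells' := cells ++ [(r, c)]
      let r' : Int := if sr < r then r - 1 else if r < sr then r + 1 else r
      let c' : Int := if sc < c then c - 1 else if c < sc then c + 1 else c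
      pvWalkBack fuel sr sc r' c' cells'

def get_cells_in_line_alt (start : Int × Int) (end_ : Int × Int) : List (Int × Int) :=
  let start_row := start.1
  let start_col := start.2
  let dr := end_.1 - start_row
  let dc := end_.2 - start_col
  if ¬ (dr = 0 ∨ dc = 0 ∨ |dr| = |dc|) then []
  else
    ((pvWalkBack ((end_.1 - start_row).natAbs + (end_.2 - start_col).natAbs)
        start_row start_col end_.1 end_.2 []) ++ [(start_row, start_col)]).reverse

-- ===== PRECONDITION & SPEC =====
def Spec_get_cells_in_line (start : Int × Int) (end_ : Int × Int) (out : List (Int × Int)) : Prop := out = get_cells_in_line_alt start end_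
instance (start : Int × Int) (end_ : Int × Int) (out : List (Int × Int)) : Decidable (Spec_get_cells_in_line start end_ out) := by unfold Spec_get_cells_in_line; infer_instance

-- ===== CLAIM (what is proved, stated in full; the proofs are below) =====
def Claim_equal_get_cells_in_line : Prop := ∀ (start : Int × Int) (end_ : Int × Int), Dom_get_cells_in_line start end_ → Spec_get_cells_in_line start end_ (get_cells_in_line start end_)

-- ===== LEMMAS AND PROOFS =====

theorem range_map_congr {b : Type} {n m : Nat} {f g : Nat → b} (h : n = m)
    (he : ∀ k, k < n → f k = g k) : (List.range n).map f = (List.range m).map g := by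
  subst h
  exact List.map_congr_left (fun k hk => he k (List.mem_range.mp hk))

theorem foldl_append_map {a b : Type} (l : List a) (f : a → b) (acc : List b) :
    l.foldl (fun ac x => ac ++ [f x]) acc = acc ++ l.map f := by
  induction l generalizing acc with
  | nil => simp
  | cons h t ih => simp [List.foldl, ih]

-- the backward walk from (sr + n·ρ, sc + n·γ), for unit/zero signs, lists the
-- cells at parameters n, n-1, …, 1
theorem pvWalkBack_eq (n : Nat) (sr sc ρ γ : Int) (fuel : Nat) (hf : n ≤ fuel)
    (acc : List (Int × Int))
    (hρ : ρ = 1 ∨ ρ = 0 ∨ ρ = -1) (hγ : γ = 1 ∨ γ = 0 ∨ γ = -1)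
    (hnz : n ≠ 0 → ¬(ρ = 0 ∧ γ = 0)) :
    pvWalkBack fuel sr sc (sr + n * ρ) (sc + n * γ) acc
      = acc ++ (List.range n).map (fun i => (sr + ((n - i : Nat)) * ρ, sc + ((n - i : Nat)) * γ)) := by
  induction n generalizing acc fuel with
  | zero => cases fuel <;> simp [pvWalkBack]
  | succ n ih =>
    obtain ⟨m, rfl⟩ : ∃ m, fuel = m + 1 := ⟨fuel - 1, by omega⟩
    rw [pvWalkBack]
    have hne : ¬(sr + (↑(n+1)) * ρ = sr ∧ sc + (↑(n+1)) * γ = sc) := by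
      have := hnz (Nat.succ_ne_zero n)
      rcases hρ with h | h | h <;> rcases hγ with h' | h' | h' <;> subst h <;> subst h' <;> omega
    rw [if_neg hne]
    have hr : (if sr < sr + (↑(n+1)) * ρ then sr + (↑(n+1)) * ρ - 1
        else if sr + (↑(n+1)) * ρ < sr then sr + (↑(n+1)) * ρ + 1 else sr + (↑(n+1)) * ρ)
        = sr + n * ρ := by
      rcases hρ with h | h | h <;> subst h <;> push_cast <;> split_ifs <;> omega
    have hc : (if sc < sc + (↑(n+1)) * γ then sc + (↑(n+1)) * γ - 1
        else if sc + (↑(n+1)) * γ < sc then sc + (↑(n+1)) * γ + 1 else sc + (↑(n+1)) * γ)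
        = sc + n * γ := by
      rcases hγ with h | h | h <;> subst h <;> push_cast <;> split_ifs <;> omega
    rw [hr, hc, ih m (by omega) _ (fun _ => hnz (Nat.succ_ne_zero n))]
    rw [List.range_succ_eq_map, List.map_cons, List.map_map, List.append_assoc]
    simp [Function.comp, Nat.succ_sub_succ]

theorem rev_map_range {α : Type} (g : Nat → α) (n : Nat) :
    ((List.range n).map (fun i => g (n - i))).reverse = (List.range n).map (fun i => g (i + 1)) := by
  induction n with
  | zero => simp
  | succ n ih =>
    calc ((List.range (n+1)).map (fun i => g (n + 1 - i))).reverse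
        = (g (n+1) :: (List.range n).map (fun i => g (n - i))).reverse := by
          rw [List.range_succ_eq_map, List.map_cons, List.map_map]
          simp [Function.comp, Nat.succ_sub_succ]
      _ = (List.range n).map (fun i => g (i + 1)) ++ [g (n+1)] := by
          rw [List.reverse_cons, ih]
      _ = (List.range (n+1)).map (fun i => g (i + 1)) := by
          rw [List.range_succ, List.map_append, List.map_singleton]

-- B's full pipeline on a valid line, in closed map form
theorem alt_valid (sr sc ρ γ : Int) (n fuel : Nat) (hf : n ≤ fuel)
    (hρ : ρ = 1 ∨ ρ = 0 ∨ ρ = -1) (hγ : γ = 1 ∨ γ = 0 ∨ γ = -1)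
    (hnz : n ≠ 0 → ¬(ρ = 0 ∧ γ = 0)) :
    ((pvWalkBack fuel sr sc (sr + n * ρ) (sc + n * γ) []) ++ [(sr, sc)]).reverse
      = (List.range (n + 1)).map (fun (i : Nat) => (sr + (i : Int) * ρ, sc + (i : Int) * γ)) := by
  rw [pvWalkBack_eq n sr sc ρ γ fuel hf [] hρ hγ hnz, List.nil_append, List.reverse_append,
    List.reverse_singleton, List.singleton_append,
    rev_map_range (fun (i : Nat) => (sr + (i : Int) * ρ, sc + (i : Int) * γ)) n,
    List.range_succ_eq_map]
  simp only [List.map_cons, List.map_map, Nat.cast_zero, zero_mul, add_zero,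
    List.cons.injEq, true_and]
  exact List.map_congr_left fun k _ => by simp [Function.comp]

-- ===== VERDICT (by name: the statement is the Claim_ definition above) =====
theorem get_cells_in_line_spec : Claim_equal_get_cells_in_line := by
  intro start end_ _hd
  unfold Spec_get_cells_in_line get_cells_in_line get_cells_in_line_alt
  obtain ⟨sr, sc⟩ := start
  obtain ⟨er, ec⟩ := end_
  simp only [foldl_append_map, List.nil_append]
  by_cases h1 : sr = er
  · subst h1
    by_cases h2 : sc < ec
    · -- horizontal, rightward: ρ = 0, γ = 1, n = ec - sc
      rw [if_pos rfl, if_pos h2]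
      have g : ¬¬(sr - sr = 0 ∨ ec - sc = 0 ∨ |sr - sr| = |ec - sc|) := by simp
      rw [if_neg g]
      have hB := alt_valid sr sc 0 1 (ec - sc).toNat ((sr - sr).natAbs + (ec - sc).natAbs) (by omega) (by norm_num) (by norm_num)
        (fun _ => by norm_num)
      rw [show sr + ((ec - sc).toNat : Int) * 0 = sr by ring,
        show sc + ((ec - sc).toNat : Int) * 1 = ec by omega] at hB
      rw [hB, PySem.List.pyRange_one, List.map_map]
      apply range_map_congr
      · omega
      · intro k _; norm_num
    · by_cases h3 : sc = ec
      · -- degenerate single cell: n = 0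
        subst h3
        rw [if_pos rfl, if_neg (lt_irrefl sc)]
        have g : ¬¬(sr - sr = 0 ∨ sc - sc = 0 ∨ |sr - sr| = |sc - sc|) := by simp
        rw [if_neg g]
        have hB := alt_valid sr sc 0 0 0 ((sr - sr).natAbs + (sc - sc).natAbs) (by omega) (by norm_num) (by norm_num) (fun h => absurd rfl h)
        rw [show sr + ((0:Nat) : Int) * 0 = sr by ring,
          show sc + ((0:Nat) : Int) * 0 = sc by ring] at hB
        rw [hB, PySem.List.pyRange_neg_one, List.map_map]
        apply range_map_congr
        · simp
        · intro k hk
          have : k = 0 := by omega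
          subst this; norm_num
      · -- horizontal, leftward: ρ = 0, γ = -1, n = sc - ec
        rw [if_pos rfl, if_neg h2]
        have g : ¬¬(sr - sr = 0 ∨ ec - sc = 0 ∨ |sr - sr| = |ec - sc|) := by simp
        rw [if_neg g]
        have hB := alt_valid sr sc 0 (-1) (sc - ec).toNat ((sr - sr).natAbs + (ec - sc).natAbs) (by omega) (by norm_num) (by norm_num)
          (fun _ => by norm_num)
        rw [show sr + ((sc - ec).toNat : Int) * 0 = sr by ring,
          show sc + ((sc - ec).toNat : Int) * (-1) = ec by omega] at hB
        rw [hB, PySem.List.pyRange_neg_one, List.map_map]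
        apply range_map_congr
        · omega
        · intro k _
          simp [Prod.ext_iff]
          ring
  · by_cases h2 : sc = ec
    · subst h2
      by_cases h3 : sr < er
      · -- vertical, downward: ρ = 1, γ = 0, n = er - sr
        rw [if_neg h1, if_pos rfl, if_pos h3]
        have g : ¬¬(er - sr = 0 ∨ sc - sc = 0 ∨ |er - sr| = |sc - sc|) := by simp
        rw [if_neg g]
        have hB := alt_valid sr sc 1 0 (er - sr).toNat ((er - sr).natAbs + (sc - sc).natAbs) (by omega) (by norm_num) (by norm_num)
          (fun _ => by norm_num)
        rw [show sr + ((er - sr).toNat : Int) * 1 = er by omega,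
          show sc + ((er - sr).toNat : Int) * 0 = sc by ring] at hB
        rw [hB, PySem.List.pyRange_one, List.map_map]
        apply range_map_congr
        · omega
        · intro k _; norm_num
      · -- vertical, upward: ρ = -1, γ = 0, n = sr - er
        rw [if_neg h1, if_pos rfl, if_neg h3]
        have g : ¬¬(er - sr = 0 ∨ sc - sc = 0 ∨ |er - sr| = |sc - sc|) := by simp
        rw [if_neg g]
        have hB := alt_valid sr sc (-1) 0 (sr - er).toNat ((er - sr).natAbs + (sc - sc).natAbs) (by omega) (by norm_num) (by norm_num)
          (fun _ => by norm_num)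
        rw [show sr + ((sr - er).toNat : Int) * (-1) = er by omega,
          show sc + ((sr - er).toNat : Int) * 0 = sc by ring] at hB
        rw [hB, PySem.List.pyRange_neg_one, List.map_map]
        apply range_map_congr
        · omega
        · intro k _
          simp [Prod.ext_iff]
          ring
    · by_cases h3 : |sr - er| = |sc - ec|
      · -- diagonal
        rw [if_neg h1, if_neg h2, if_pos h3]
        have g : ¬¬(er - sr = 0 ∨ ec - sc = 0 ∨ |er - sr| = |ec - sc|) := by
          rw [abs_sub_comm er sr, abs_sub_comm ec sc]
          simp [h3]
        rw [if_neg g]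
        rw [Int.abs_eq_natAbs, Int.abs_eq_natAbs] at h3
        by_cases h4 : sr < er <;> by_cases h5 : sc < ec
        · rw [if_pos h4, if_pos h5]
          have hB := alt_valid sr sc 1 1 (er - sr).natAbs ((er - sr).natAbs + (ec - sc).natAbs) (by omega) (by norm_num) (by norm_num)
            (fun _ => by norm_num)
          rw [show sr + ((er - sr).natAbs : Int) * 1 = er by omega,
            show sc + ((er - sr).natAbs : Int) * 1 = ec by omega] at hB
          rw [hB, PySem.List.pyRange_one, List.map_map]
          apply range_map_congr
          · rw [Int.abs_eq_natAbs]; omega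
          · intro k _; norm_num
        · rw [if_pos h4, if_neg h5]
          have hB := alt_valid sr sc 1 (-1) (er - sr).natAbs ((er - sr).natAbs + (ec - sc).natAbs) (by omega) (by norm_num) (by norm_num)
            (fun _ => by norm_num)
          rw [show sr + ((er - sr).natAbs : Int) * 1 = er by omega,
            show sc + ((er - sr).natAbs : Int) * (-1) = ec by omega] at hB
          rw [hB, PySem.List.pyRange_one, List.map_map]
          apply range_map_congr
          · rw [Int.abs_eq_natAbs]; omega
          · intro k _; norm_num
        · rw [if_neg h4, if_pos h5]
          have hB := alt_valid sr sc (-1) 1 (er - sr).natAbs ((er - sr).natAbs + (ec - sc).natAbs) (by omega) (by norm_num) (by norm_num)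
            (fun _ => by norm_num)
          rw [show sr + ((er - sr).natAbs : Int) * (-1) = er by omega,
            show sc + ((er - sr).natAbs : Int) * 1 = ec by omega] at hB
          rw [hB, PySem.List.pyRange_one, List.map_map]
          apply range_map_congr
          · rw [Int.abs_eq_natAbs]; omega
          · intro k _; norm_num
        · rw [if_neg h4, if_neg h5]
          have hB := alt_valid sr sc (-1) (-1) (er - sr).natAbs ((er - sr).natAbs + (ec - sc).natAbs) (by omega) (by norm_num) (by norm_num)
            (fun _ => by norm_num)
          rw [show sr + ((er - sr).natAbs : Int) * (-1) = er by omega,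
            show sc + ((er - sr).natAbs : Int) * (-1) = ec by omega] at hB
          rw [hB, PySem.List.pyRange_one, List.map_map]
          apply range_map_congr
          · rw [Int.abs_eq_natAbs]; omega
          · intro k _; norm_num
      · -- not a line: both sides empty
        rw [if_neg h1, if_neg h2, if_neg h3]
        have g : ¬(er - sr = 0 ∨ ec - sc = 0 ∨ |er - sr| = |ec - sc|) := by
          rw [abs_sub_comm er sr, abs_sub_comm ec sc]
          push Not
          refine ⟨by omega, by omega, h3⟩
        rw [if_pos g]
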